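-- pv_equiv track=rewrite | github.com/yasha1971-coder/glyph-engine | tools/fm_chunk_hist_layout_rerank_v2_1.py | build_valid_chains
-- ===== SOURCE A (Python) =====
-- def build_valid_chains(position_lists, expected_gap=176, tol=32, min_chain_len=3):
--     n = len(position_lists)
--     if n == 0 or not position_lists[0]:
--         return []
--
--     chains = [[p] for p in position_lists[0]]
--
--     for frag_idx in range(1, n):
--         next_positions = position_lists[frag_idx]
--         if not next_positions:
--             break
--
--         new_chains = []
--         for chain in chains:
--             prev = chain[-1]
--             for p in next_positions:
--                 gap = p - prev
--                 if gap <= 0: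
--                     continue
--                 if abs(gap - expected_gap) <= tol:
--                     new_chains.append(chain + [p])
--
--         if not new_chains:
--             break
--         chains = new_chains
--
--     chains = [c for c in chains if len(c) >= min_chain_len]
--     return chains
-- ===== SOURCE B (Python) =====
-- def build_valid_chains(position_lists, expected_gap=176, tol=32, min_chain_len=3):
--     if not position_lists or not position_lists[0]:
--         return []
--     lo = expected_gap - tol
--     hi = expected_gap + tol
--
--     def ok(q, p):
--         return q < p and lo <= p - q <= hi
--
--     # phase 1: per-fragment forward reachability; find the effective depth L
--     # (the last fragment the chains actually reach, honouring A's two breaks)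
--     frontier = set(position_lists[0])
--     L = 0
--     for k in range(1, len(position_lists)):
--         nxt = position_lists[k]
--         if not nxt:
--             break
--         reach = {p for p in nxt if any(ok(q, p) for q in frontier)}
--         if not reach:
--             break
--         frontier = reach
--         L = k
--
--     if L + 1 < min_chain_len:
--         return []
--
--     # phase 2: backward viability — positions from which level L is reachable
--     viable = [None] * (L + 1)
--     viable[L] = set(position_lists[L])
--     for k in range(L - 1, -1, -1):
--         viable[k] = {q for q in position_lists[k]
--                      if any(ok(q, p) for p in viable[k + 1])}
--
--     # phase 3: depth-first enumeration of complete chains, pruned by viability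
--     out = []
--     chain = []
--
--     def dfs(k, q):
--         chain.append(q)
--         if k == L:
--             out.append(chain.copy())
--         else:
--             for p in position_lists[k + 1]:
--                 if p in viable[k + 1] and ok(q, p):
--                     dfs(k + 1, p)
--         chain.pop()
--
--     for q in position_lists[0]:
--         if q in viable[0]:
--             dfs(0, q)
--     return out
-- ===== Notes on version B (the rewrite author's own statement) =====
-- stated objective: alternative
-- what changed: B replaces A's breadth-first list-of-whole-chains extension by a three-phase algorithm: a forward reachability pass over position sets to find the effective depth, a backward viability pass, and a depth-first enumeration of complete chains pruned by viability, so partial chains that die mid-way are never materialised.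
import Mathlib
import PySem

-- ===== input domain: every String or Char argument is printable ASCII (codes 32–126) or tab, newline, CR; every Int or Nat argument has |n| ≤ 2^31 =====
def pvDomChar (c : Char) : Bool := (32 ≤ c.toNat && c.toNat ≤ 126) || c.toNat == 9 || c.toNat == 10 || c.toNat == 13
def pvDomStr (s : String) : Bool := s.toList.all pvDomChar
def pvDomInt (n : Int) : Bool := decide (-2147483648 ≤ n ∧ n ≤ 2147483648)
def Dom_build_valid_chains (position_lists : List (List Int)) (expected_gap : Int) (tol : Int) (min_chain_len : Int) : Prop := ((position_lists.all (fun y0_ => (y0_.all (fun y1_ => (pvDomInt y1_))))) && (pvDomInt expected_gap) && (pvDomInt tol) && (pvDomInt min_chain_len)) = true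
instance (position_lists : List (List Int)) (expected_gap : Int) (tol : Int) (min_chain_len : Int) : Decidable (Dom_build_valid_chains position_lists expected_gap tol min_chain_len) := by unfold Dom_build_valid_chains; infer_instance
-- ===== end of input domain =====

-- B replaces A's breadth-first whole-chain extension by forward reachability +
-- backward viability passes and a pruned depth-first enumeration (objective:
-- alternative — dead partial chains are never materialised).

-- ===== PORT A =====
-- inner double loop building new_chains for one fragment (A's code, step for step)
def bvcStepA (expected_gap : Int) (tol : Int) (next_positions : List Int)
    (chains : List (List Int)) : List (List Int) :=
  chains.foldl (fun nc chain =>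
    -- chain[-1]: chains are nonempty by construction, so the default is never used
    let prev := PySem.List.pyGetD chain (-1) 0
    next_positions.foldl (fun nc2 p =>
      let gap := p - prev
      if gap ≤ 0 then nc2
      else if |gap - expected_gap| ≤ tol then nc2 ++ [chain ++ [p]] else nc2) nc) []

def build_valid_chains (position_lists : List (List Int)) (expected_gap : Int) (tol : Int) (min_chain_len : Int) : List (List Int) :=
  let n : Int := position_lists.length
  if n = 0 ∨ PySem.List.pyGetD position_lists 0 [] = [] then []
  else
    let chains0 : List (List Int) :=
      (PySem.List.pyGetD position_lists 0 []).map (fun p => [p])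
    -- the for-loop with its two breaks, as a fold over a (chains, broke) state
    let st := (PySem.List.pyRange 1 n 1).foldl
      (fun (st : List (List Int) × Bool) frag_idx =>
        if st.2 then st else
        let next_positions := PySem.List.pyGetD position_lists frag_idx []
        if next_positions = [] then (st.1, true) else
        let new_chains := bvcStepA expected_gap tol next_positions st.1
        if new_chains = [] then (st.1, true) else (new_chains, false))
      (chains0, false)
    st.1.filter (fun c => min_chain_len ≤ (c.length : Int))

-- ===== PORT B =====
-- ok(q, p): the gap from q to p is positive and inside [lo, hi]
def bvcOk (lo hi q p : Int) : Bool :=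
  decide (q < p) && (decide (lo ≤ p - q) && decide (p - q ≤ hi))

-- phase 1 loop: returns the fragments 1..L the chains actually reach
-- (Python tracks the index L; the port returns the traversed prefix itself)
def bvcForward (lo hi : Int) (frontier : List Int) (rest : List (List Int)) :
    List (List Int) :=
  match rest with
  | [] => []
  | nxt :: rest' =>
    if nxt = [] then []
    else
      let reach : PySem.Set Int :=
        PySem.Set.ofList (nxt.filter (fun p => frontier.any (fun q => bvcOk lo hi q p)))
      if reach = [] then []
      else nxt :: bvcForward lo hi reach rest'

-- phase 2 loop (k from L-1 down to 0), as structural recursion on fragments 0..L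
def bvcViables (lo hi : Int) (used : List (List Int)) : List (PySem.Set Int) :=
  match used with
  | [] => []
  | [last] => [PySem.Set.ofList last]
  | f :: rest =>
    let vs := bvcViables lo hi rest
    let vnext := vs.headD []
    PySem.Set.ofList (f.filter (fun q => vnext.any (fun p => bvcOk lo hi q p))) :: vs

-- phase 3: dfs(k, q) with chain the prefix below q; 'levels' pairs each deeper
-- fragment with its viability set (structural recursion replaces the index k)
def bvcDfs (lo hi : Int) (q : Int) (levels : List (List Int × PySem.Set Int))
    (chain : List Int) : List (List Int) :=
  match levels with
  | [] => [chain ++ [q]]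
  | (frag, vset) :: rest =>
    frag.foldl (fun acc p =>
      if vset.contains p && bvcOk lo hi q p then
        acc ++ bvcDfs lo hi p rest (chain ++ [q])
      else acc) []

def build_valid_chains_alt (position_lists : List (List Int)) (expected_gap : Int) (tol : Int) (min_chain_len : Int) : List (List Int) :=
  match position_lists with
  | [] => []
  | f0 :: rest =>
    if f0 = [] then []
    else
      let lo := expected_gap - tol
      let hi := expected_gap + tol
      let used := f0 :: bvcForward lo hi (PySem.Set.ofList f0) rest
      if (used.length : Int) < min_chain_len then []
      else
        let viables := bvcViables lo hi used
        let levels := used.tail.zip viables.tail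
        f0.foldl (fun acc q =>
          if (viables.headD []).contains q then acc ++ bvcDfs lo hi q levels []
          else acc) []

-- ===== PRECONDITION & SPEC =====
def Spec_build_valid_chains (position_lists : List (List Int)) (expected_gap : Int) (tol : Int) (min_chain_len : Int) (out : List (List Int)) : Prop := out = build_valid_chains_alt position_lists expected_gap tol min_chain_len
instance (position_lists : List (List Int)) (expected_gap : Int) (tol : Int) (min_chain_len : Int) (out : List (List Int)) : Decidable (Spec_build_valid_chains position_lists expected_gap tol min_chain_len out) := by unfold Spec_build_valid_chains; infer_instance

-- ===== CLAIM (what is proved, stated in full; the proofs are below) =====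
def Claim_equal_build_valid_chains : Prop := ∀ (position_lists : List (List Int)) (expected_gap : Int) (tol : Int) (min_chain_len : Int), Dom_build_valid_chains position_lists expected_gap tol min_chain_len → Spec_build_valid_chains position_lists expected_gap tol min_chain_len (build_valid_chains position_lists expected_gap tol min_chain_len)

-- ===== LEMMAS AND PROOFS =====

-- chain[-1] with the default, as A computes it
def bvcLast (c : List Int) : Int := PySem.List.pyGetD c (-1) 0

-- A's loop body over one fragment (broke flag in the second component)
def bvcLoop (eg tol : Int) (st : List (List Int) × Bool) (next : List Int) :
    List (List Int) × Bool :=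
  if st.2 then st else
  if next = [] then (st.1, true) else
  let nc := bvcStepA eg tol next st.1
  if nc = [] then (st.1, true) else (nc, false)

-- unpruned depth-first enumeration: all completions of chain++[q] through fs
def bvcExt (lo hi : Int) (q : Int) (fs : List (List Int)) (chain : List Int) :
    List (List Int) :=
  match fs with
  | [] => [chain ++ [q]]
  | f :: rest =>
    f.foldl (fun acc p =>
      if bvcOk lo hi q p then acc ++ bvcExt lo hi p rest (chain ++ [q]) else acc) []

-- A's rounds, iterated over a list of fragments
def bvcPaths (expected_gap tol : Int) (chains : List (List Int))
    (fs : List (List Int)) : List (List Int) :=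
  fs.foldl (fun ch f => bvcStepA expected_gap tol f ch) chains

-- the viability invariant phase 3 relies on
def bvcGood (lo hi : Int) : List (List Int × PySem.Set Int) → Prop
  | [] => True
  | [(f, v)] => v = PySem.Set.ofList f
  | (f, v) :: (f', v') :: rest =>
      v = PySem.Set.ofList (f.filter (fun q => v'.any (fun p => bvcOk lo hi q p)))
      ∧ bvcGood lo hi ((f', v') :: rest)

theorem bvcLast_append (c : List Int) (p : Int) : bvcLast (c ++ [p]) = p := by
  simp [bvcLast, PySem.List.pyGetD, PySem.List.pyGet?_neg_one_append_singleton]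

theorem bvcLast_singleton (p : Int) : bvcLast [p] = p := bvcLast_append [] p

theorem bvc_dropLast_last {c : List Int} (h : c ≠ []) :
    c.dropLast ++ [bvcLast c] = c := by
  have : bvcLast c = c.getLast h := by
    simp [bvcLast, PySem.List.pyGetD, PySem.List.pyGet?_neg_one,
      List.getLast?_eq_getLast_of_ne_nil h]
  rw [this, List.dropLast_append_getLast h]

theorem bvc_set_ofList_eq_nil {l : List Int} :
    PySem.Set.ofList l = [] ↔ l = [] := by
  constructor
  · intro h
    by_contra hl
    obtain ⟨x, hx⟩ := List.exists_mem_of_ne_nil l hl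
    have := (PySem.Set.mem_ofList l x).mpr hx
    rw [h] at this
    exact absurd this (List.not_mem_nil)
  · rintro rfl; rfl

theorem bvc_contains_iff (s : PySem.Set Int) (x : Int) :
    s.contains x = true ↔ x ∈ s := by
  simp [PySem.Set.contains]

theorem bvcExt_flatMap (lo hi q : Int) (f : List Int) (rest : List (List Int))
    (chain : List Int) :
    bvcExt lo hi q (f :: rest) chain
      = (f.filter (fun p => bvcOk lo hi q p)).flatMap
          (fun p => bvcExt lo hi p rest (chain ++ [q])) := by
  show f.foldl _ [] = _
  rw [PySem.List.foldl_if_eq_foldl_filter, PySem.List.foldl_append_eq_flatMap]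
  simp

theorem bvc_mem_ext_length (lo hi : Int) (fs : List (List Int)) :
    ∀ (q : Int) (chain c : List Int), c ∈ bvcExt lo hi q fs chain →
      c.length = chain.length + 1 + fs.length := by
  induction fs with
  | nil => intro q chain c hc; simp [bvcExt] at hc; subst hc; simp
  | cons f rest ih =>
    intro q chain c hc
    rw [bvcExt_flatMap] at hc
    simp only [List.mem_flatMap] at hc
    obtain ⟨p, _, hc⟩ := hc
    have := ih p (chain ++ [q]) c hc
    simp at this ⊢; omega

-- A's one round in flatMap form
theorem bvcStepA_eq (expected_gap tol : Int) (next : List Int)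
    (chains : List (List Int)) :
    bvcStepA expected_gap tol next chains
      = chains.flatMap (fun c =>
          (next.filter (fun p =>
            bvcOk (expected_gap - tol) (expected_gap + tol) (bvcLast c) p)).map
            (fun p => c ++ [p])) := by
  unfold bvcStepA
  have hinner : ∀ (c : List Int) (nc : List (List Int)),
      next.foldl (fun nc2 p =>
        let gap := p - PySem.List.pyGetD c (-1) 0
        if gap ≤ 0 then nc2
        else if |gap - expected_gap| ≤ tol then nc2 ++ [c ++ [p]] else nc2) nc
      = nc ++ (next.filter (fun p =>
          bvcOk (expected_gap - tol) (expected_gap + tol) (bvcLast c) p)).map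
            (fun p => c ++ [p]) := by
    intro c nc
    have hf : (fun (nc2 : List (List Int)) p =>
        let gap := p - PySem.List.pyGetD c (-1) 0
        if gap ≤ 0 then nc2
        else if |gap - expected_gap| ≤ tol then nc2 ++ [c ++ [p]] else nc2)
        = fun (nc2 : List (List Int)) p =>
          if bvcOk (expected_gap - tol) (expected_gap + tol) (bvcLast c) p then
            nc2 ++ [c ++ [p]] else nc2 := by
      funext nc2 p
      simp only [bvcOk, bvcLast, Bool.and_eq_true, decide_eq_true_eq, abs_le]
      split_ifs with h1 h2 h3 h3 <;> first | rfl | (exfalso; omega)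
    rw [hf, PySem.List.foldl_append_if]
  have hcongr : chains.foldl (fun nc c =>
        next.foldl (fun nc2 p =>
          let gap := p - PySem.List.pyGetD c (-1) 0
          if gap ≤ 0 then nc2
          else if |gap - expected_gap| ≤ tol then nc2 ++ [c ++ [p]] else nc2) nc) []
      = chains.foldl (fun nc c =>
          nc ++ (next.filter (fun p =>
            bvcOk (expected_gap - tol) (expected_gap + tol) (bvcLast c) p)).map
            (fun p => c ++ [p])) [] := by
    apply PySem.List.foldl_congr_mem
    intro nc c _
    exact hinner c nc
  rw [hcongr, PySem.List.foldl_append_eq_flatMap]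
  simp

theorem bvcStepA_mem_ne_nil (eg tol : Int) (next : List Int)
    (chains : List (List Int)) :
    ∀ c' ∈ bvcStepA eg tol next chains, c' ≠ [] := by
  intro c' hc'
  rw [bvcStepA_eq] at hc'
  simp only [List.mem_flatMap, List.mem_map] at hc'
  obtain ⟨c, _, p, _, rfl⟩ := hc'
  simp

theorem bvcStepA_eq_nil_iff (eg tol : Int) (nxt : List Int)
    (chains : List (List Int)) :
    bvcStepA eg tol nxt chains = []
      ↔ ∀ c ∈ chains, ∀ p ∈ nxt,
          ¬ bvcOk (eg - tol) (eg + tol) (bvcLast c) p = true := by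
  rw [bvcStepA_eq, List.flatMap_eq_nil_iff]
  simp [List.filter_eq_nil_iff]

-- iterated rounds = unpruned DFS from each chain's last element
theorem bvcPaths_eq_ext (expected_gap tol : Int) (fs : List (List Int)) :
    ∀ chains, (∀ c ∈ chains, c ≠ []) →
    bvcPaths expected_gap tol chains fs
      = chains.flatMap (fun c =>
          bvcExt (expected_gap - tol) (expected_gap + tol) (bvcLast c) fs
            c.dropLast) := by
  induction fs with
  | nil =>
    intro chains hne
    show chains = _
    have : chains.flatMap (fun c =>
        bvcExt (expected_gap - tol) (expected_gap + tol) (bvcLast c) [] c.dropLast)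
        = chains.flatMap (fun c => [c]) := by
      apply List.flatMap_congr
      intro c hc
      show [c.dropLast ++ [bvcLast c]] = [c]
      rw [bvc_dropLast_last (hne c hc)]
    rw [this]
    simp
  | cons f rest ih =>
    intro chains hne
    show bvcPaths expected_gap tol (bvcStepA expected_gap tol f chains) rest = _
    rw [ih _ (bvcStepA_mem_ne_nil _ _ _ _), bvcStepA_eq, List.flatMap_assoc]
    apply List.flatMap_congr
    intro c hc
    rw [List.flatMap_map, bvcExt_flatMap, bvc_dropLast_last (hne c hc)]
    apply List.flatMap_congr
    intro p _
    rw [bvcLast_append]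
    congr 1
    simp

theorem bvc_frozen (eg tol : Int) (l : List (List Int)) (c : List (List Int)) :
    l.foldl (bvcLoop eg tol) (c, true) = (c, true) := by
  induction l with
  | nil => rfl
  | cons x t ih => simpa [bvcLoop] using ih

theorem bvc_forward_eq (eg tol : Int) (rest : List (List Int)) :
    ∀ (chains : List (List Int)) (frontier : List Int),
      chains ≠ [] → (∀ c ∈ chains, c ≠ []) →
      (∀ x, x ∈ frontier ↔ ∃ c ∈ chains, bvcLast c = x) →
      (rest.foldl (bvcLoop eg tol) (chains, false)).1
        = bvcPaths eg tol chains
            (bvcForward (eg - tol) (eg + tol) frontier rest) := by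
  induction rest with
  | nil => intro chains frontier _ _ _; rfl
  | cons nxt rest' ih =>
    intro chains frontier hne hne2 hmem
    by_cases hnxt : nxt = []
    · subst hnxt
      show (rest'.foldl (bvcLoop eg tol) (bvcLoop eg tol (chains, false) [])).1 = _
      have h1 : bvcLoop eg tol (chains, false) [] = (chains, true) := by
        simp [bvcLoop]
      rw [h1, bvc_frozen]
      simp [bvcForward, bvcPaths]
    · -- the filtered reach list
      set fl := nxt.filter (fun p => frontier.any (fun q => bvcOk (eg - tol) (eg + tol) q p)) with hfl
      have hiff : bvcStepA eg tol nxt chains = [] ↔ PySem.Set.ofList fl = [] := by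
        rw [bvcStepA_eq_nil_iff, bvc_set_ofList_eq_nil, hfl, List.filter_eq_nil_iff]
        constructor
        · intro h p hp hany
          rw [List.any_eq_true] at hany
          obtain ⟨q, hq, hok⟩ := hany
          obtain ⟨c, hc, rfl⟩ := (hmem q).mp hq
          exact h c hc p hp hok
        · intro h c hc p hp hok
          apply h p hp
          rw [List.any_eq_true]
          exact ⟨bvcLast c, (hmem (bvcLast c)).mpr ⟨c, hc, rfl⟩, hok⟩
      by_cases hstep : bvcStepA eg tol nxt chains = []
      · show (rest'.foldl (bvcLoop eg tol) (bvcLoop eg tol (chains, false) nxt)).1 = _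
        have h1 : bvcLoop eg tol (chains, false) nxt = (chains, true) := by
          simp [bvcLoop, hnxt, hstep]
        rw [h1, bvc_frozen]
        have hreach : PySem.Set.ofList fl = [] := hiff.mp hstep
        show chains = bvcPaths eg tol chains (bvcForward (eg - tol) (eg + tol) frontier (nxt :: rest'))
        rw [bvcForward]
        simp only [hnxt, if_false, hfl.symm ▸ hreach]
        simp [bvcPaths]
      · have hreach : ¬ PySem.Set.ofList fl = [] := fun h => hstep (hiff.mpr h)
        show (rest'.foldl (bvcLoop eg tol) (bvcLoop eg tol (chains, false) nxt)).1 = _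
        have h1 : bvcLoop eg tol (chains, false) nxt
            = (bvcStepA eg tol nxt chains, false) := by
          simp [bvcLoop, hnxt, hstep]
        rw [h1]
        have hfwd : bvcForward (eg - tol) (eg + tol) frontier (nxt :: rest')
            = nxt :: bvcForward (eg - tol) (eg + tol) (PySem.Set.ofList fl) rest' := by
          rw [bvcForward]
          simp only [hnxt, if_false]
          rw [if_neg (by exact hreach)]
        rw [hfwd]
        show _ = bvcPaths eg tol (bvcStepA eg tol nxt chains)
            (bvcForward (eg - tol) (eg + tol) (PySem.Set.ofList fl) rest')
        apply ih
        · exact hstep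
        · exact bvcStepA_mem_ne_nil _ _ _ _
        · intro x
          rw [PySem.Set.mem_ofList, hfl, List.mem_filter]
          constructor
          · rintro ⟨hx, hany⟩
            rw [List.any_eq_true] at hany
            obtain ⟨q, hq, hok⟩ := hany
            obtain ⟨c, hc, rfl⟩ := (hmem q).mp hq
            refine ⟨c ++ [x], ?_, bvcLast_append c x⟩
            rw [bvcStepA_eq]
            simp only [List.mem_flatMap, List.mem_map]
            exact ⟨c, hc, x, List.mem_filter.mpr ⟨hx, hok⟩, rfl⟩
          · rintro ⟨c', hc', rfl⟩
            rw [bvcStepA_eq] at hc'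
            simp only [List.mem_flatMap, List.mem_map] at hc'
            obtain ⟨c, hc, p, hpf, rfl⟩ := hc'
            rw [List.mem_filter] at hpf
            rw [bvcLast_append]
            refine ⟨hpf.1, ?_⟩
            rw [List.any_eq_true]
            exact ⟨bvcLast c, (hmem (bvcLast c)).mpr ⟨c, hc, rfl⟩, hpf.2⟩

theorem bvcViables_cons₂ (lo hi : Int) (f f' : List Int) (rest : List (List Int)) :
    bvcViables lo hi (f :: f' :: rest)
      = PySem.Set.ofList (f.filter (fun q =>
          ((bvcViables lo hi (f' :: rest)).headD []).any (fun p => bvcOk lo hi q p)))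
        :: bvcViables lo hi (f' :: rest) := rfl

theorem bvcViables_length (lo hi : Int) (used : List (List Int)) :
    (bvcViables lo hi used).length = used.length := by
  induction used with
  | nil => rfl
  | cons f rest ih =>
    cases rest with
    | nil => rfl
    | cons f' rest' =>
      rw [bvcViables_cons₂]
      simp only [List.length_cons]
      rw [ih]
      simp

theorem bvcGood_zip (lo hi : Int) (used : List (List Int)) :
    bvcGood lo hi (used.zip (bvcViables lo hi used)) := by
  induction used with
  | nil => trivial
  | cons f rest ih =>
    cases rest with
    | nil => show bvcGood lo hi [(f, PySem.Set.ofList f)]; rfl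
    | cons f' rest' =>
      have hlen : (bvcViables lo hi (f' :: rest')).length = rest'.length + 1 := by
        rw [bvcViables_length]; rfl
      have hne : bvcViables lo hi (f' :: rest') ≠ [] := by
        intro h; rw [h] at hlen; simp at hlen
      obtain ⟨v0, vs', hvs⟩ := List.exists_cons_of_ne_nil hne
      rw [bvcViables_cons₂, hvs]
      show bvcGood lo hi ((f, PySem.Set.ofList (f.filter (fun q =>
          ((v0 :: vs').headD []).any (fun p => bvcOk lo hi q p)))) :: (f', v0)
          :: rest'.zip vs')
      refine ⟨rfl, ?_⟩
      have := ih
      rw [hvs] at this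
      exact this

theorem bvcGood_tail (lo hi : Int) (x : List Int × PySem.Set Int)
    (rest : List (List Int × PySem.Set Int)) (h : bvcGood lo hi (x :: rest)) :
    bvcGood lo hi rest := by
  obtain ⟨f, v⟩ := x
  cases rest with
  | nil => trivial
  | cons y t => obtain ⟨f', v'⟩ := y; exact h.2

theorem bvc_dead (lo hi : Int) (lvls : List (List Int × PySem.Set Int)) :
    ∀ (f : List Int) (v : PySem.Set Int), bvcGood lo hi ((f, v) :: lvls) →
    ∀ p ∈ f, ¬ v.contains p = true →
    ∀ chain, bvcExt lo hi p (lvls.map Prod.fst) chain = [] := by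
  induction lvls with
  | nil =>
    intro f v hgood p hp hcont chain
    exfalso
    apply hcont
    have hv : v = PySem.Set.ofList f := hgood
    rw [hv, bvc_contains_iff, PySem.Set.mem_ofList]
    exact hp
  | cons fv rest ih =>
    obtain ⟨f', v'⟩ := fv
    intro f v hgood p hp hcont chain
    obtain ⟨hv, hgood'⟩ := hgood
    have hnotany : ¬ v'.any (fun y => bvcOk lo hi p y) = true := by
      intro hany
      apply hcont
      rw [hv, bvc_contains_iff, PySem.Set.mem_ofList, List.mem_filter]
      exact ⟨hp, hany⟩
    simp only [List.map_cons]
    rw [bvcExt_flatMap, List.flatMap_eq_nil_iff]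
    intro y hy
    rw [List.mem_filter] at hy
    have hyv' : ¬ v'.contains y = true := by
      intro hcy
      apply hnotany
      rw [List.any_eq_true]
      exact ⟨y, (bvc_contains_iff v' y).mp hcy, hy.2⟩
    exact ih f' v' hgood' y hy.1 hyv' _

theorem bvcDfs_eq_ext (lo hi : Int) (lvls : List (List Int × PySem.Set Int)) :
    bvcGood lo hi lvls → ∀ q chain,
      bvcDfs lo hi q lvls chain = bvcExt lo hi q (lvls.map Prod.fst) chain := by
  induction lvls with
  | nil => intro _ q chain; rfl
  | cons fv rest ih =>
    obtain ⟨f, v⟩ := fv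
    intro hgood q chain
    simp only [List.map_cons]
    show f.foldl _ [] = f.foldl _ []
    apply PySem.List.foldl_congr_mem
    intro acc p hp
    by_cases hc : v.contains p = true
    · by_cases hok : bvcOk lo hi q p = true
      · rw [if_pos (by rw [Bool.and_eq_true]; exact ⟨hc, hok⟩), if_pos hok,
          ih (bvcGood_tail lo hi _ _ hgood) p (chain ++ [q])]
      · rw [if_neg (by rw [Bool.and_eq_true]; rintro ⟨_, h⟩; exact hok h), if_neg hok]
    · by_cases hok : bvcOk lo hi q p = true
      · have hdead := bvc_dead lo hi rest f v hgood p hp hc (chain ++ [q])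
        rw [if_neg (by rw [Bool.and_eq_true]; rintro ⟨h, _⟩; exact hc h), if_pos hok,
          hdead, List.append_nil]
      · rw [if_neg (by rw [Bool.and_eq_true]; rintro ⟨h, _⟩; exact hc h), if_neg hok]

-- ===== VERDICT (by name: the statement is the Claim_ definition above) =====
theorem build_valid_chains_spec : Claim_equal_build_valid_chains := by
  intro position_lists eg tol mcl _
  show build_valid_chains position_lists eg tol mcl
      = build_valid_chains_alt position_lists eg tol mcl
  cases position_lists with
  | nil => simp [build_valid_chains, build_valid_chains_alt, PySem.List.pyGetD]
  | cons f0 rest =>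
    by_cases hf0 : f0 = []
    · subst hf0
      simp [build_valid_chains, build_valid_chains_alt, PySem.List.pyGetD_zero_cons]
    · -- A side
      have hguard : ¬ (((f0 :: rest).length : Int) = 0
          ∨ PySem.List.pyGetD (f0 :: rest) 0 [] = []) := by
        rw [PySem.List.pyGetD_zero_cons]
        rintro (h | h)
        · have h' : (f0 :: rest).length = 0 := by exact_mod_cast h
          simp at h' 
        · exact hf0 h
      set lo := eg - tol with hlo
      set hi := eg + tol with hhi
      set fwd := bvcForward lo hi (PySem.Set.ofList f0) rest with hfwdDef
      set chains0 : List (List Int) := f0.map (fun p => [p]) with hch0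
      have hAfold :
          ((PySem.List.pyRange 1 ((f0 :: rest).length : Int) 1).foldl
            (fun (st : List (List Int) × Bool) frag_idx =>
              if st.2 then st else
              let next_positions := PySem.List.pyGetD (f0 :: rest) frag_idx []
              if next_positions = [] then (st.1, true) else
              let new_chains := bvcStepA eg tol next_positions st.1
              if new_chains = [] then (st.1, true) else (new_chains, false))
            (chains0, false))
          = rest.foldl (bvcLoop eg tol) (chains0, false) := by
        have h := PySem.List.foldl_pyRange_pyGetD' (f0 :: rest) []
          (bvcLoop eg tol) (chains0, false) (a := 1) (by norm_num)
        calc (PySem.List.pyRange 1 ((f0 :: rest).length : Int) 1).foldl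
              (fun (st : List (List Int) × Bool) frag_idx =>
                if st.2 then st else
                let next_positions := PySem.List.pyGetD (f0 :: rest) frag_idx []
                if next_positions = [] then (st.1, true) else
                let new_chains := bvcStepA eg tol next_positions st.1
                if new_chains = [] then (st.1, true) else (new_chains, false))
              (chains0, false)
            = (PySem.List.pyRange 1 ((f0 :: rest).length : Int) 1).foldl
                (fun st j => bvcLoop eg tol st (PySem.List.pyGetD (f0 :: rest) j []))
                (chains0, false) := rfl
          _ = ((f0 :: rest).drop (1 : Int).toNat).foldl (bvcLoop eg tol)
                (chains0, false) := h
          _ = rest.foldl (bvcLoop eg tol) (chains0, false) := rfl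
      have hch0ne : chains0 ≠ [] := by
        rw [hch0]; simp [hf0]
      have hch0els : ∀ c ∈ chains0, c ≠ [] := by
        rw [hch0]; intro c hc; simp only [List.mem_map] at hc
        obtain ⟨p, _, rfl⟩ := hc; simp
      have hfrontier : ∀ x, x ∈ PySem.Set.ofList f0
          ↔ ∃ c ∈ chains0, bvcLast c = x := by
        intro x
        rw [PySem.Set.mem_ofList, hch0]
        constructor
        · intro hx; exact ⟨[x], List.mem_map.mpr ⟨x, hx, rfl⟩, bvcLast_singleton x⟩
        · rintro ⟨c, hc, rfl⟩
          simp only [List.mem_map] at hc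
          obtain ⟨p, hp, rfl⟩ := hc
          rw [bvcLast_singleton]; exact hp
      have hA : build_valid_chains (f0 :: rest) eg tol mcl
          = (bvcPaths eg tol chains0 fwd).filter
              (fun c => decide (mcl ≤ (c.length : Int))) := by
        show (if (((f0 :: rest).length : Int) = 0
            ∨ PySem.List.pyGetD (f0 :: rest) 0 [] = []) then ([] : List (List Int))
          else _) = _
        rw [if_neg hguard]
        show (((PySem.List.pyRange 1 ((f0 :: rest).length : Int) 1).foldl _
            ((PySem.List.pyGetD (f0 :: rest) 0 []).map (fun p => [p]), false)).1).filter _ = _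
        rw [show (PySem.List.pyGetD (f0 :: rest) 0 []).map (fun p => [p]) = chains0 by
          rw [PySem.List.pyGetD_zero_cons, hch0]]
        rw [hAfold, bvc_forward_eq eg tol rest chains0 (PySem.Set.ofList f0)
          hch0ne hch0els hfrontier]
      -- common flatMap form
      have hExt : bvcPaths eg tol chains0 fwd
          = f0.flatMap (fun q => bvcExt lo hi q fwd []) := by
        rw [bvcPaths_eq_ext eg tol fwd chains0 hch0els, hch0, List.flatMap_map]
        apply List.flatMap_congr
        intro p _
        rw [bvcLast_singleton]
        rfl
      -- B side
      set used := f0 :: fwd with hused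
      set viables := bvcViables lo hi used with hvbl
      have hvlen : viables.length = fwd.length + 1 := by
        rw [hvbl, bvcViables_length, hused]; rfl
      have hvne : viables ≠ [] := by
        intro h; rw [h] at hvlen; simp at hvlen
      obtain ⟨v0, vs, hvs⟩ := List.exists_cons_of_ne_nil hvne
      have hvslen : vs.length = fwd.length := by
        rw [hvs] at hvlen; simpa using hvlen
      have hgood : bvcGood lo hi ((f0, v0) :: fwd.zip vs) := by
        have := bvcGood_zip lo hi used
        rw [hvbl.symm, hvs] at this
        rw [hused] at this
        exact this
      have hB : build_valid_chains_alt (f0 :: rest) eg tol mcl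
          = if ((used.length : Int) < mcl) then []
            else f0.foldl (fun acc q =>
              if v0.contains q then acc ++ bvcDfs lo hi q (fwd.zip vs) []
              else acc) [] := by
        show (if f0 = [] then ([] : List (List Int)) else _) = _
        rw [if_neg hf0]
        show (if ((used.length : Int) < mcl) then ([] : List (List Int))
          else f0.foldl (fun acc q =>
            if (viables.headD []).contains q then
              acc ++ bvcDfs lo hi q (used.tail.zip viables.tail) []
            else acc) []) = _
        rw [hvs]
        rfl
      rw [hA, hExt, hB]
      have hdfs : f0.foldl (fun acc q =>
            if v0.contains q then acc ++ bvcDfs lo hi q (fwd.zip vs) []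
            else acc) []
          = f0.flatMap (fun q => bvcExt lo hi q fwd []) := by
        have hmapfst : (fwd.zip vs).map Prod.fst = fwd :=
          List.map_fst_zip (by rw [hvslen])
        have hstep : f0.foldl (fun acc q =>
              if v0.contains q then acc ++ bvcDfs lo hi q (fwd.zip vs) []
              else acc) []
            = f0.foldl (fun acc q => acc ++ bvcExt lo hi q fwd []) [] := by
          apply PySem.List.foldl_congr_mem
          intro acc q hq
          by_cases hc : v0.contains q = true
          · rw [if_pos hc, bvcDfs_eq_ext lo hi _ (bvcGood_tail lo hi _ _ hgood),
              hmapfst]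
          · rw [if_neg hc]
            have hdead := bvc_dead lo hi (fwd.zip vs) f0 v0 hgood q hq hc []
            rw [hmapfst] at hdead
            rw [hdead]
            simp
        rw [hstep, PySem.List.foldl_append_eq_flatMap]
        simp
      rw [hdfs]
      have hlenall : ∀ c ∈ f0.flatMap (fun q => bvcExt lo hi q fwd []),
          c.length = fwd.length + 1 := by
        intro c hc
        simp only [List.mem_flatMap] at hc
        obtain ⟨q, _, hc⟩ := hc
        have := bvc_mem_ext_length lo hi fwd q [] c hc
        simp only [List.length_nil] at this
        omega
      have husedlen : used.length = fwd.length + 1 := by rw [hused]; rfl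
      by_cases hm : (used.length : Int) < mcl
      · rw [if_pos hm]
        rw [List.filter_eq_nil_iff]
        intro c hc
        have := hlenall c hc
        simp only [this, decide_eq_true_eq]
        rw [husedlen] at hm
        push_cast at hm ⊢
        omega
      · rw [if_neg hm]
        rw [List.filter_eq_self]
        intro c hc
        have := hlenall c hc
        simp only [this, decide_eq_true_eq]
        rw [husedlen] at hm
        push_cast at hm ⊢
        omega
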